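-- pv_equiv track=rewrite | github.com/AMohn9/AdventOfCode | 2021/day_15.py | extend_mat
-- ===== SOURCE A (Python) =====
-- from typing import Tuple, List
--
-- def extend_mat(orig_mat: List[List[int]]):
--     mat = []
--     for line in orig_mat:
--         to_add = []
--         to_add.extend(line)
--
--         new_line = line
--         for right in range(1, 5):
--             new_line = [(i % 9) + 1 for i in new_line]
--             to_add.extend(new_line)
--         mat.append(to_add)
--
--     last_added = mat
--     for down in range(1, 5):
--         to_add = []
--         for line in last_added:
--             to_add.append([(i % 9) + 1 for i in line])
--         mat.extend(to_add)
--         last_added = to_add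
--
--     return mat
-- ===== SOURCE B (Python) =====
-- from typing import List
--
-- def extend_mat(orig_mat: List[List[int]]):
--     mat = []
--     for dy in range(5):
--         for line in orig_mat:
--             mat.append([v if dy + dx == 0 else ((v - 1 + dy + dx) % 9) + 1
--                         for dx in range(5) for v in line])
--     return mat
-- ===== Notes on version B (the rewrite author's own statement) =====
-- stated objective: alternative
-- what changed: Each output cell is computed directly from its 5x5 tile offset dy+dx with the closed-form wrap ((v-1+dy+dx)%9)+1 (identity at offset 0), replacing A's two-phase incremental propagation that re-maps the previous block row-wise and then matrix-wise.
import Mathlib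
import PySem

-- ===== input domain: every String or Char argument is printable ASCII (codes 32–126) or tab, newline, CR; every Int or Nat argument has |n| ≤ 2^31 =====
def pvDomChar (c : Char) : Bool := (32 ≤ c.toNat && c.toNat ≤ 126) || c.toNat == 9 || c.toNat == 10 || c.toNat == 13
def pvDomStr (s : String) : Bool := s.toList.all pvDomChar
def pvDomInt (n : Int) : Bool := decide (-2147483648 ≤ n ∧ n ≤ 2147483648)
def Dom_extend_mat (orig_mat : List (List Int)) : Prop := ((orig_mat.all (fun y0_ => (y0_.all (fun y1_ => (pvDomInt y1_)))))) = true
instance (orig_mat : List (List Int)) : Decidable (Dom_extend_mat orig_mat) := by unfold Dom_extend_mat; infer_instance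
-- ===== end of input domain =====

-- B tiles the matrix 5×5 computing each cell directly from its tile offset dy+dx, instead of A's
-- incremental re-mapping of the previous block; same return value, alternative decomposition.

-- ===== PORT A =====
-- [(i % 9) + 1 for i in line]
def pvInc (line : List Int) : List Int := line.map (fun i => PySem.Int.mod i 9 + 1)

def extend_mat (orig_mat : List (List Int)) : List (List Int) :=
  let mat := orig_mat.foldl (fun mat line =>
    let st := (PySem.List.pyRange 1 5 1).foldl
      (fun (st : List Int × List Int) _ =>
        let new_line := pvInc st.2
        (st.1 ++ new_line, new_line)) (line, line)
    mat ++ [st.1]) []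
  let st2 := (PySem.List.pyRange 1 5 1).foldl
    (fun (st : List (List Int) × List (List Int)) _ =>
      let to_add := st.2.map pvInc
      (st.1 ++ to_add, to_add)) (mat, mat)
  st2.1

-- ===== PORT B =====
def extend_mat_alt (orig_mat : List (List Int)) : List (List Int) :=
  (PySem.List.pyRange 0 5 1).foldl (fun mat dy =>
    orig_mat.foldl (fun mat line =>
      mat ++ [(PySem.List.pyRange 0 5 1).flatMap (fun dx =>
        line.map (fun v => if dy + dx = 0 then v else PySem.Int.mod (v - 1 + dy + dx) 9 + 1))]) mat) []

-- ===== PRECONDITION & SPEC =====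
def Spec_extend_mat (orig_mat : List (List Int)) (out : List (List Int)) : Prop := out = extend_mat_alt orig_mat
instance (orig_mat : List (List Int)) (out : List (List Int)) : Decidable (Spec_extend_mat orig_mat out) := by unfold Spec_extend_mat; infer_instance

-- ===== CLAIM (what is proved, stated in full; the proofs are below) =====
def Claim_equal_extend_mat : Prop := ∀ (orig_mat : List (List Int)), Dom_extend_mat orig_mat → Spec_extend_mat orig_mat (extend_mat orig_mat)

-- ===== LEMMAS AND PROOFS =====
-- cell with offset k ≥ 1
def pvG (k : Int) (v : Int) : Int := PySem.Int.mod (v - 1 + k) 9 + 1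

lemma pvInc_map_g (k : Int) (l : List Int) :
    pvInc (l.map (pvG k)) = l.map (pvG (k + 1)) := by
  simp only [pvInc, List.map_map]
  refine List.map_congr_left (fun v _ => ?_)
  simp only [Function.comp, pvG]
  simp only [PySem.Int.mod_eq_emod_of_pos (show (0:Int) < 9 by norm_num)]
  omega

lemma pvC1 (l : List Int) : pvInc l = l.map (pvG 1) := by
  simp only [pvInc]
  refine List.map_congr_left (fun v _ => ?_)
  simp only [pvG]
  norm_num

lemma pvC2 (l : List Int) : pvInc (pvInc l) = l.map (pvG 2) := by
  rw [pvC1 l, pvInc_map_g]; norm_num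
lemma pvC3 (l : List Int) : pvInc (pvInc (pvInc l)) = l.map (pvG 3) := by
  rw [pvC2 l, pvInc_map_g]; norm_num
lemma pvC4 (l : List Int) : pvInc (pvInc (pvInc (pvInc l))) = l.map (pvG 4) := by
  rw [pvC3 l, pvInc_map_g]; norm_num
lemma pvC5 (l : List Int) : pvInc (pvInc (pvInc (pvInc (pvInc l)))) = l.map (pvG 5) := by
  rw [pvC4 l, pvInc_map_g]; norm_num
lemma pvC6 (l : List Int) : pvInc (pvInc (pvInc (pvInc (pvInc (pvInc l))))) = l.map (pvG 6) := by
  rw [pvC5 l, pvInc_map_g]; norm_num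
lemma pvC7 (l : List Int) : pvInc (pvInc (pvInc (pvInc (pvInc (pvInc (pvInc l)))))) = l.map (pvG 7) := by
  rw [pvC6 l, pvInc_map_g]; norm_num
lemma pvC8 (l : List Int) : pvInc (pvInc (pvInc (pvInc (pvInc (pvInc (pvInc (pvInc l))))))) = l.map (pvG 8) := by
  rw [pvC7 l, pvInc_map_g]; norm_num

lemma pvInc_append (a b : List Int) : pvInc (a ++ b) = pvInc a ++ pvInc b :=
  List.map_append ..

lemma pvCell_ne (dy dx : Int) (h : ¬ dy + dx = 0) (line : List Int) :
    line.map (fun v => if dy + dx = 0 then v else PySem.Int.mod (v - 1 + dy + dx) 9 + 1)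
      = line.map (pvG (dy + dx)) := by
  refine List.map_congr_left (fun v _ => ?_)
  rw [if_neg h]
  simp only [pvG]
  ring_nf

lemma pvCell_eq (dy dx : Int) (h : dy + dx = 0) (line : List Int) :
    line.map (fun v => if dy + dx = 0 then v else PySem.Int.mod (v - 1 + dy + dx) 9 + 1)
      = line := by
  have : (fun (v : Int) => if dy + dx = 0 then v else PySem.Int.mod (v - 1 + dy + dx) 9 + 1) = id := by
    funext v; rw [if_pos h]; rfl
  rw [this, List.map_id]

theorem extend_mat_spec : Claim_equal_extend_mat := by
  intro m _
  show extend_mat m = extend_mat_alt m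
  have hr15 : PySem.List.pyRange 1 5 1 = [1, 2, 3, 4] := by decide
  have hr05 : PySem.List.pyRange 0 5 1 = [0, 1, 2, 3, 4] := by decide
  simp only [extend_mat, extend_mat_alt, hr15, hr05, List.foldl_cons, List.foldl_nil,
    List.flatMap_cons, List.flatMap_nil, PySem.List.foldl_append_singleton_eq_map,
    List.nil_append, List.map_map, List.append_assoc]
  congr 1
  · refine List.map_congr_left (fun line _ => ?_)
    rw [pvCell_eq 0 0 (by norm_num), pvCell_ne 0 1 (by norm_num), pvCell_ne 0 2 (by norm_num),
        pvCell_ne 0 3 (by norm_num), pvCell_ne 0 4 (by norm_num), pvC4, pvC3, pvC2, pvC1]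
    norm_num [List.append_assoc]
  congr 1
  · refine List.map_congr_left (fun line _ => ?_)
    simp only [Function.comp_apply]
    rw [pvCell_ne 1 0 (by norm_num), pvCell_ne 1 1 (by norm_num), pvCell_ne 1 2 (by norm_num),
        pvCell_ne 1 3 (by norm_num), pvCell_ne 1 4 (by norm_num)]
    rw [pvInc_append, pvInc_append, pvInc_append, pvInc_append,
        pvC5, pvC4, pvC3, pvC2, pvC1]
    norm_num [List.append_assoc]
  congr 1
  · refine List.map_congr_left (fun line _ => ?_)
    simp only [Function.comp_apply]
    rw [pvCell_ne 2 0 (by norm_num), pvCell_ne 2 1 (by norm_num), pvCell_ne 2 2 (by norm_num),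
        pvCell_ne 2 3 (by norm_num), pvCell_ne 2 4 (by norm_num)]
    rw [pvInc_append, pvInc_append, pvInc_append, pvInc_append,
        pvInc_append, pvInc_append, pvInc_append, pvInc_append,
        pvC6, pvC5, pvC4, pvC3, pvC2]
    norm_num [List.append_assoc]
  congr 1
  · refine List.map_congr_left (fun line _ => ?_)
    simp only [Function.comp_apply]
    rw [pvCell_ne 3 0 (by norm_num), pvCell_ne 3 1 (by norm_num), pvCell_ne 3 2 (by norm_num),
        pvCell_ne 3 3 (by norm_num), pvCell_ne 3 4 (by norm_num)]
    simp only [pvInc_append]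
    rw [pvC7, pvC6, pvC5, pvC4, pvC3]
    norm_num [List.append_assoc]
  · refine List.map_congr_left (fun line _ => ?_)
    simp only [Function.comp_apply]
    rw [pvCell_ne 4 0 (by norm_num), pvCell_ne 4 1 (by norm_num), pvCell_ne 4 2 (by norm_num),
        pvCell_ne 4 3 (by norm_num), pvCell_ne 4 4 (by norm_num)]
    simp only [pvInc_append]
    rw [pvC8, pvC7, pvC6, pvC5, pvC4]
    norm_num [List.append_assoc]
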